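-- pv_equiv track=rewrite | github.com/zedosoad1995/Nerdle | get_combinations_helper.py | fill_digits
-- ===== SOURCE A (Python) =====
-- def fill_digits(calculation, digits):
--     calc = list(calculation)
--
--     digit_pos = 0
--     for digit in digits:
--         digit_pos = calc.index('_', digit_pos)
--         calc[digit_pos] = digit
--         digit_pos += 1
--
--     return ''.join(calc)
-- ===== SOURCE B (Python) =====
-- def fill_digits(calculation, digits):
--     it = iter(digits)
--     out = []
--     for ch in calculation:
--         if ch == '_':
--             out.append(next(it, ch))
--         else:
--             out.append(ch)
--     return ''.join(out)
-- ===== Notes on version B (the rewrite author's own statement) =====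
-- stated objective: idiomatic
-- what changed: A mutates a char list via repeated list.index scans from a moving start position; B makes one forward pass over the string, drawing replacements from an iterator with next(it, ch), never searching or mutating.
import Mathlib
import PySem

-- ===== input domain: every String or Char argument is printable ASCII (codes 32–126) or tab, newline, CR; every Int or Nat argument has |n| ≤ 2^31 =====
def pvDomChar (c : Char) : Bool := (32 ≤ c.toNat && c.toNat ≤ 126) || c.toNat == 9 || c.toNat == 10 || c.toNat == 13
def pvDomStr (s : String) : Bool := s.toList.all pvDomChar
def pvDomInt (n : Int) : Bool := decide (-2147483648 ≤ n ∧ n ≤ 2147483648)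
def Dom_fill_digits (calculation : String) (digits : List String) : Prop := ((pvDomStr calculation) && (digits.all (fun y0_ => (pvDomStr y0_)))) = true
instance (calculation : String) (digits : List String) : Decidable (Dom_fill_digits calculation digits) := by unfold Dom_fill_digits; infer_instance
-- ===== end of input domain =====

-- One honest line: B replaces A's repeated list.index scans + in-place mutation by a single
-- forward pass drawing from an iterator (idiomatic, same cost); Pre_ excludes inputs where A raises ValueError
-- (more digits than underscores).

-- ===== PORT A =====
-- hand port of Python's list.index(x, start): smallest i ≥ start with calc[i] = x, none = ValueError
def pyIndexFrom (xs : List String) (x : String) (start : Nat) : Option Nat :=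
  ((xs.drop start).idxOf? x).map (· + start)

-- the for-loop over digits, carrying the mutable list and digit_pos
def fillA_loop : List String → List String → Nat → List String
  | [], xs, _ => xs
  | d :: ds, xs, pos =>
    match pyIndexFrom xs "_" pos with
    | none => xs          -- Python raises ValueError here; excluded by Pre_fill_digits
    | some i => fillA_loop ds (xs.set i d) (i + 1)

def fill_digits (calculation : String) (digits : List String) : String :=
  String.join (fillA_loop digits (calculation.toList.map (fun c => String.ofList [c])) 0)

-- ===== PORT B =====
-- one pass over the characters, consuming `digits` as the iterator
def fillB_loop : List Char → List String → List String
  | [], _ => []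
  | c :: cs, ds =>
    if c = '_' then
      match ds with
      | d :: ds' => d :: fillB_loop cs ds'
      | [] => String.ofList [c] :: fillB_loop cs []
    else String.ofList [c] :: fillB_loop cs ds

def fill_digits_alt (calculation : String) (digits : List String) : String :=
  String.join (fillB_loop calculation.toList digits)

-- ===== PRECONDITION & SPEC =====
-- Pre_ excludes exactly the inputs where A raises ValueError (more digits than underscores).
def Pre_fill_digits (calculation : String) (digits : List String) : Prop :=
  digits.length ≤ calculation.toList.count '_'
instance (calculation : String) (digits : List String) : Decidable (Pre_fill_digits calculation digits) := by unfold Pre_fill_digits; infer_instance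

def pvWitness_fill_digits : String × List String := ("1+_=_3", ["2", "4"])

def Spec_fill_digits (calculation : String) (digits : List String) (out : String) : Prop := out = fill_digits_alt calculation digits
instance (calculation : String) (digits : List String) (out : String) : Decidable (Spec_fill_digits calculation digits out) := by unfold Spec_fill_digits; infer_instance

-- ===== CLAIM (what is proved, stated in full; the proofs are below) =====
def Claim_equal_fill_digits : Prop := ∀ (calculation : String) (digits : List String), Dom_fill_digits calculation digits → Pre_fill_digits calculation digits → Spec_fill_digits calculation digits (fill_digits calculation digits)

-- ===== LEMMAS AND PROOFS =====

-- B with an exhausted iterator just re-renders the characters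
theorem fillB_nil (cs : List Char) : fillB_loop cs [] = cs.map (fun c => String.ofList [c]) := by
  induction cs with
  | nil => rfl
  | cons c cs ih => by_cases h : c = '_' <;> simp [fillB_loop, h, ih]

theorem mkS_eq_underscore (c : Char) : String.ofList [c] = "_" ↔ c = '_' := by
  constructor
  · intro h
    have h2 := congrArg String.toList h
    simpa [String.toList_ofList] using h2
  · rintro rfl; rfl

-- stepping past a non-underscore position does not change A's loop
theorem fillA_step (ds xs : List String) (pos : Nat) (s : String)
    (hs : xs[pos]? = some s) (hne : s ≠ "_") :
    fillA_loop ds xs pos = fillA_loop ds xs (pos + 1) := by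
  cases ds with
  | nil => rfl
  | cons d ds =>
    have hlt : pos < xs.length := (List.getElem?_eq_some_iff.mp hs).1
    have hget : xs[pos] = s := by
      have := List.getElem?_eq_getElem hlt
      rw [this] at hs; exact Option.some.inj hs
    have hdrop : xs.drop pos = s :: xs.drop (pos + 1) := by
      rw [List.drop_eq_getElem_cons hlt, hget]
    have hidx : pyIndexFrom xs "_" pos = pyIndexFrom xs "_" (pos + 1) := by
      unfold pyIndexFrom
      rw [hdrop, List.idxOf?_cons]
      simp only [beq_iff_eq, hne, if_false, Option.map_map]
      cases (xs.drop (pos + 1)).idxOf? "_" with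
      | none => rfl
      | some a => simp; omega
    simp [fillA_loop, hidx]

theorem main_lemma (cs : List Char) : ∀ (ds done : List String),
    ds.length ≤ cs.count '_' →
    fillA_loop ds (done ++ cs.map (fun c => String.ofList [c])) done.length
      = done ++ fillB_loop cs ds := by
  induction cs with
  | nil =>
    intro ds done h
    have hds : ds = [] := List.eq_nil_of_length_eq_zero (Nat.le_zero.mp (by simpa using h))
    subst hds
    simp [fillA_loop, fillB_loop]
  | cons c cs ih =>
    intro ds done h
    by_cases hc : c = '_'
    · subst hc
      match ds with
      | [] => simp [fillA_loop, fillB_nil]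
      | d :: ds' =>
        have hcount : ds'.length ≤ cs.count '_' := by
          simp at h; omega
        have hidx : pyIndexFrom (done ++ ('_' :: cs).map (fun c => String.ofList [c])) "_" done.length
            = some done.length := by
          simp [pyIndexFrom]
          rw [List.idxOf?_cons]
          simp
        have hset : (done ++ ('_' :: cs).map (fun c => String.ofList [c])).set done.length d
            = (done ++ [d]) ++ cs.map (fun c => String.ofList [c]) := by
          simp
        have hrec := ih ds' (done ++ [d]) hcount
        simp only [fillA_loop, hidx, hset]
        simp only [List.length_append, List.length_cons, List.length_nil] at hrec ⊢
        simpa [fillB_loop] using hrec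
    · have hcount : ds.length ≤ cs.count '_' := by
        simpa [List.count_cons, hc] using h
      have hne : String.ofList [c] ≠ "_" := fun h' => hc ((mkS_eq_underscore c).mp h')
      have heq : done ++ (c :: cs).map (fun c => String.ofList [c])
          = (done ++ [String.ofList [c]]) ++ cs.map (fun c => String.ofList [c]) := by simp
      have hget : (done ++ (c :: cs).map (fun c => String.ofList [c]))[done.length]? = some (String.ofList [c]) := by
        simp
      have hstep := fillA_step ds _ done.length (String.ofList [c]) hget hne
      rw [hstep, heq]
      have hrec := ih ds (done ++ [String.ofList [c]]) hcount
      simp only [List.length_append, List.length_cons, List.length_nil] at hrec ⊢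
      simpa [fillB_loop, hc] using hrec

theorem fill_digits_spec : Claim_equal_fill_digits := by
  intro calculation digits _ hpre
  unfold Spec_fill_digits fill_digits fill_digits_alt
  exact congrArg String.join (by simpa using main_lemma calculation.toList digits [] hpre)
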